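-- pv_equiv track=rewrite | github.com/Shivesh777/First-Year | CSC110/lectures/week05/13-lecture13.py | multiply_adjacent_repeats
-- ===== SOURCE A (Python) =====
-- def multiply_adjacent_repeats(strings: list[str]) -> int:
--     """Return the product of the numbers of times in each given string that two
--     adjacent characters are equal.
--
--     >>> multiply_adjacent_repeats(['look', 'Davviid', 'bbccaaa'])  # 1 * 2 * 4
--     8
--     """
--     product_so_far = 1
--
--     for s in strings:
--         # Version that uses a helper function
--         # repeats = count_adjacent_repeats(s)
--         # product_so_far = product_so_far * repeats
--
--         # Using a nested loop
--         # NOTE: repeats_so_far must be "reset" for each string s.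
--         # So, this assignment statement must appear inside the outer loop,
--         # not above it.
--         repeats_so_far = 0
--
--         for i in range(0, len(s) - 1):  # s = 'look', len(s) = 4, so range(0, 3)
--             if s[i] == s[i + 1]:
--                 repeats_so_far = repeats_so_far + 1
--
--         product_so_far = product_so_far * repeats_so_far
--
--     return product_so_far
-- ===== SOURCE B (Python) =====
-- def _pairs(s: str) -> int:
--     """Adjacent-equal-pair count by divide and conquer: split s in half,
--     count pairs in each half recursively, and add the boundary pair."""
--     if len(s) < 2:
--         return 0
--     mid = len(s) // 2
--     return _pairs(s[:mid]) + _pairs(s[mid:]) + (s[mid - 1] == s[mid])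
--
--
-- def multiply_adjacent_repeats(strings: list[str]) -> int:
--     product = 1
--     for s in strings:
--         product *= _pairs(s)
--     return product
-- ===== Notes on version B (the rewrite author's own statement) =====
-- stated objective: alternative
-- what changed: Replaces A's linear indexed scan s[i]==s[i+1] with a divide-and-conquer recursion: split the string in half, count pairs in each half recursively, and add the boundary comparison; products accumulated as before.
import Mathlib
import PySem

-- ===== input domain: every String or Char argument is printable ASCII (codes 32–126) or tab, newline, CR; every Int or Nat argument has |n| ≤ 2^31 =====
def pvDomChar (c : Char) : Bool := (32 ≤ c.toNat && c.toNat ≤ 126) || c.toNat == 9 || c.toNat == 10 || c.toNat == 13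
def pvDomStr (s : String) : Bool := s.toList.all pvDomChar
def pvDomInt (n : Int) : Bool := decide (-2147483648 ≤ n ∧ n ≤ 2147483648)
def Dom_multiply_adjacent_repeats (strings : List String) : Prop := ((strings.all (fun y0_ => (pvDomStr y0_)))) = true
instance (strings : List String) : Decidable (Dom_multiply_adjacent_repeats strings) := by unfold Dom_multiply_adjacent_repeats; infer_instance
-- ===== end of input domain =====

-- B replaces A's linear indexed neighbour scan with a divide-and-conquer recursion on each string; alternative decomposition, same result.

-- ===== PORT A =====
-- inner loop: for i in range(0, len(s) - 1): if s[i] == s[i + 1]: repeats_so_far += 1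
def pvRepeatsA (cs : List Char) : Int :=
  (PySem.List.pyRange 0 ((cs.length : Int) - 1) 1).foldl
    (fun repeats_so_far i =>
      if PySem.List.pyGet? cs i = PySem.List.pyGet? cs (i + 1) then repeats_so_far + 1
      else repeats_so_far) 0

def multiply_adjacent_repeats (strings : List String) : Int :=
  strings.foldl (fun product_so_far s => product_so_far * pvRepeatsA s.toList) 1

-- ===== PORT B =====
-- _pairs: divide and conquer; s[:mid] / s[mid:] with 0 ≤ mid ≤ len(s) are exactly take/drop
-- (PySem.List.slice_to / slice_from); s[mid-1] == s[mid] are in-range lookups, ported via getElem?.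
def pvPairsB (cs : List Char) : Int :=
  if h : cs.length < 2 then 0
  else
    let mid := cs.length / 2
    pvPairsB (cs.take mid) + pvPairsB (cs.drop mid) +
      (if cs[mid - 1]? = cs[mid]? then 1 else 0)
termination_by cs.length
decreasing_by
  · simpa using by omega
  · simpa using by omega

def multiply_adjacent_repeats_alt (strings : List String) : Int :=
  strings.foldl (fun product s => product * pvPairsB s.toList) 1

-- ===== PRECONDITION & SPEC =====
def Spec_multiply_adjacent_repeats (strings : List String) (out : Int) : Prop := out = multiply_adjacent_repeats_alt strings
instance (strings : List String) (out : Int) : Decidable (Spec_multiply_adjacent_repeats strings out) := by unfold Spec_multiply_adjacent_repeats; infer_instance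

-- ===== CLAIM (what is proved, stated in full; the proofs are below) =====
def Claim_equal_multiply_adjacent_repeats : Prop := ∀ (strings : List String), Dom_multiply_adjacent_repeats strings → Spec_multiply_adjacent_repeats strings (multiply_adjacent_repeats strings)

-- ===== LEMMAS AND PROOFS =====

-- reference count of adjacent equal pairs, by structural recursion
def pvPairs : List Char → Int
  | [] => 0
  | [_] => 0
  | a :: b :: t => (if a = b then 1 else 0) + pvPairs (b :: t)

-- A-side: the indexed loop counts exactly pvPairs
theorem pvCountP_pairs (cs : List Char) :
    (List.countP (fun k => decide (cs[k]? = cs[k + 1]?)) (List.range (cs.length - 1)) : Int)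
      = pvPairs cs := by
  induction cs with
  | nil => simp [pvPairs]
  | cons a t ih =>
    cases t with
    | nil => simp [pvPairs]
    | cons b u =>
      rw [show (a :: b :: u).length - 1 = ((b :: u).length - 1) + 1 by simp,
        List.range_succ_eq_map]
      simp only [List.countP_cons, List.countP_map, pvPairs]
      have hc : ((fun k => decide ((a :: b :: u)[k]? = (a :: b :: u)[k + 1]?)) ∘ Nat.succ)
          = fun k => decide ((b :: u)[k]? = (b :: u)[k + 1]?) := by
        funext k; simp [Function.comp, Nat.succ_eq_add_one]
      rw [hc]
      push_cast
      rw [ih]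
      by_cases h : a = b
      · simp [h]; ring
      · simp [h]

theorem pvRepeatsA_eq_pairs (cs : List Char) : pvRepeatsA cs = pvPairs cs := by
  unfold pvRepeatsA
  cases cs with
  | nil => simp [pvPairs, PySem.List.pyRange]
  | cons a t =>
    rw [show ((a :: t).length : Int) - 1 = ((t.length : Nat) : Int) by simp,
      PySem.List.pyRange_zero_natCast, List.foldl_map]
    have hstep : (fun (r : Int) (k : Nat) =>
        if PySem.List.pyGet? (a :: t) ((k : Int)) = PySem.List.pyGet? (a :: t) ((k : Int) + 1) then r + 1 else r)
        = fun r k => if (fun k => decide ((a :: t)[k]? = (a :: t)[k + 1]?)) k = true then r + 1 else r := by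
      funext r k
      rw [show ((k : Int) + 1) = ((k + 1 : Nat) : Int) by push_cast; ring]
      simp [PySem.List.pyGet?_natCast]
    rw [hstep, PySem.List.foldl_count_if]
    rw [show t.length = (a :: t).length - 1 by simp]
    simpa using pvCountP_pairs (a :: t)

-- concatenation law for the pair count (both parts nonempty)
theorem pvPairs_append (xs ys : List Char) (hx : xs ≠ []) (hy : ys ≠ []) :
    pvPairs (xs ++ ys) = pvPairs xs + pvPairs ys +
      (if xs.getLast? = ys.head? then 1 else 0) := by
  induction xs with
  | nil => exact absurd rfl hx
  | cons a t ih =>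
    cases t with
    | nil =>
      cases ys with
      | nil => exact absurd rfl hy
      | cons b u =>
        simp only [List.cons_append, List.nil_append, pvPairs, List.getLast?_singleton,
          List.head?_cons]
        have : (if a = b then (1 : Int) else 0) = (if some a = some b then 1 else 0) := by
          simp
        rw [this]; ring_nf
    | cons c u =>
      have ht : (c :: u : List Char) ≠ [] := by simp
      simp only [List.cons_append, pvPairs]
      rw [show c :: (u ++ ys) = (c :: u) ++ ys from by simp, ih ht, List.getLast?_cons_cons]
      ring

-- B-side: divide and conquer computes pvPairs
theorem pvPairsB_eq_pairs (cs : List Char) : pvPairsB cs = pvPairs cs := by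
  induction cs using pvPairsB.induct with
  | case1 cs h =>
    rw [pvPairsB]
    rw [dif_pos h]
    match cs, h with
    | [], _ => rfl
    | [_], _ => rfl
  | case2 cs h mid ih1 ih2 =>
    have hlen : 2 ≤ cs.length := by omega
    have hmid1 : 1 ≤ mid := by omega
    have hmid2 : mid < cs.length := by omega
    rw [pvPairsB, dif_neg h]
    show pvPairsB (cs.take mid) + pvPairsB (cs.drop mid) +
        (if cs[mid - 1]? = cs[mid]? then 1 else 0) = pvPairs cs
    rw [ih1, ih2]
    have hsplit : cs = cs.take mid ++ cs.drop mid := (List.take_append_drop mid cs).symm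
    have htake : (cs.take mid) ≠ [] := by
      intro hnil
      have := congrArg List.length hnil
      simp [Nat.min_eq_left (le_of_lt hmid2)] at this
      omega
    have hdrop : (cs.drop mid) ≠ [] := by
      intro hnil
      have := congrArg List.length hnil
      simp at this
      omega
    rw [show pvPairs cs = pvPairs (cs.take mid ++ cs.drop mid) from by rw [← hsplit]]
    rw [pvPairs_append _ _ htake hdrop]
    congr 1
    rw [List.getLast?_eq_getElem?, List.head?_drop]
    have hltake : (cs.take mid).length = mid := by
      simp [Nat.min_eq_left (le_of_lt hmid2)]
    rw [hltake, List.getElem?_take_of_lt (by omega)]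

-- ===== VERDICT (by name: the statement is the Claim_ definition above) =====
theorem multiply_adjacent_repeats_spec : Claim_equal_multiply_adjacent_repeats := by
  intro strings _
  unfold Spec_multiply_adjacent_repeats multiply_adjacent_repeats multiply_adjacent_repeats_alt
  have hfun : (fun (product : Int) (s : String) => product * pvPairsB s.toList)
      = fun product_so_far s => product_so_far * pvRepeatsA s.toList := by
    funext p s
    rw [pvRepeatsA_eq_pairs, pvPairsB_eq_pairs]
  rw [hfun]
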